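-- pv_equiv track=rewrite | github.com/dailysound/Programmers_Python | Python3/Level1/최대공약수와 최소공배수.py | solution
-- ===== SOURCE A (Python) =====
-- def solution(n, m):
--     max_num = 0
--     min_num = 0
--     answer = []
--
--     for i in range(1, max(n,m)+1):
--         if (n % i == 0) & (m % i == 0):
--             max_num = i
--     answer.append(max_num)
--
--     min_num = (n * m)//max_num
--
--     answer.append(min_num)
--
--     return answer
-- ===== SOURCE B (Python) =====
-- def solution(n, m):
--     a, b = abs(n), abs(m)
--     while b:
--         a, b = b, a % b
--     return [a, n * m // a]
-- ===== Notes on version B (the rewrite author's own statement) =====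
-- stated objective: faster
-- what changed: Replaces A's linear scan of all candidates 1..max(n,m) for the greatest common divisor with the Euclidean algorithm on absolute values; LCM stays n*m//gcd.
-- crash fix: When n and m are both nonpositive with at least one of them nonzero, A raises ZeroDivisionError (its loop never runs, so max_num stays 0) while B returns [gcd(|n|,|m|), n*m//gcd]; with both arguments zero, both programs raise ZeroDivisionError. — e.g. on solution(-4, -6): A raises ZeroDivisionError, B returns [2, 12]
import Mathlib
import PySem

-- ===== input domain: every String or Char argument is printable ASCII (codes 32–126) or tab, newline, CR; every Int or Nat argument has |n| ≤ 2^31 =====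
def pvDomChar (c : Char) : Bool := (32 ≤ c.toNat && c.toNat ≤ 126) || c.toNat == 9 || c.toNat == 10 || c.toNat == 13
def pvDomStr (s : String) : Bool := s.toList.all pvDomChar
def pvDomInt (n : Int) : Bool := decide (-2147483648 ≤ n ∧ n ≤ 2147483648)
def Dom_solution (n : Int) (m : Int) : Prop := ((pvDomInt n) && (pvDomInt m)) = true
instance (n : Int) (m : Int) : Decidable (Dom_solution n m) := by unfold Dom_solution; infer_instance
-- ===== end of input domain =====

-- B replaces A's linear scan for the gcd by the Euclidean algorithm (asymptotically faster);
-- the lcm is n*m//gcd in both.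

-- ===== PORT A =====
def solution (n : Int) (m : Int) : List Int :=
  let max_num : Int :=
    (PySem.List.pyRange 1 (max n m + 1) 1).foldl
      (fun max_num i =>
        if (PySem.Int.mod n i == 0) && (PySem.Int.mod m i == 0) then i else max_num) 0
  let min_num : Int := PySem.Int.floordiv (n * m) max_num
  [max_num, min_num]

-- ===== PORT B =====
-- the 'while b: a, b = b, a % b' loop of Source B (on the absolute values, which are Nat)
def euclidLoop (a : Nat) (b : Nat) : Nat :=
  if b = 0 then a else euclidLoop b (a % b)
termination_by b
decreasing_by exact Nat.mod_lt a (Nat.pos_of_ne_zero (by assumption))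

def solution_alt (n : Int) (m : Int) : List Int :=
  let g : Int := (euclidLoop n.natAbs m.natAbs : Nat)
  [g, PySem.Int.floordiv (n * m) g]

-- ===== PRECONDITION & SPEC =====
-- Pre_ excludes exactly the inputs with max(n,m) ≤ 0, on which A's loop never runs and the
-- division (n*m)//max_num raises ZeroDivisionError.
def Pre_solution (n : Int) (m : Int) : Prop := 1 ≤ max n m
instance (n : Int) (m : Int) : Decidable (Pre_solution n m) := by unfold Pre_solution; infer_instance
def pvWitness_solution : Int × Int := (4, 6)

-- Where n and m are both nonpositive with at least one nonzero, A raises ZeroDivisionError; B returns [gcd(|n|,|m|), n*m//gcd]. (With both arguments zero, both programs raise.)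
def Raises_solution (n : Int) (m : Int) : Prop := n ≤ 0 ∧ m ≤ 0 ∧ ¬(n = 0 ∧ m = 0)
instance (n : Int) (m : Int) : Decidable (Raises_solution n m) := by unfold Raises_solution; infer_instance
def pvRaiseWitness_solution : Int × Int := (-4, -6)
def pvRaiseWitnessOut_solution : List Int := [2, 12]

def Spec_solution (n : Int) (m : Int) (out : List Int) : Prop := out = solution_alt n m
instance (n : Int) (m : Int) (out : List Int) : Decidable (Spec_solution n m out) := by unfold Spec_solution; infer_instance

-- ===== CLAIM (what is proved, stated in full; the proofs are below) =====
def Claim_equal_solution : Prop := ∀ (n : Int) (m : Int), Dom_solution n m → Pre_solution n m → Spec_solution n m (solution n m)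
def Claim_raises_solution : Prop := (∀ (n : Int) (m : Int), Dom_solution n m → Raises_solution n m → ¬ Pre_solution n m) ∧ (Dom_solution (pvRaiseWitness_solution.1) (pvRaiseWitness_solution.2) ∧ Raises_solution (pvRaiseWitness_solution.1) (pvRaiseWitness_solution.2) ∧ solution_alt (pvRaiseWitness_solution.1) (pvRaiseWitness_solution.2) = pvRaiseWitnessOut_solution)

-- ===== LEMMAS AND PROOFS =====

-- B's loop is the gcd
theorem euclidLoop_eq_gcd (b a : Nat) : euclidLoop a b = Nat.gcd a b := by
  induction b using Nat.strong_induction_on generalizing a with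
  | _ b ih =>
    rw [euclidLoop]
    by_cases hb : b = 0
    · simp [hb]
    · rw [if_neg hb, ih (a % b) (Nat.mod_lt a (Nat.pos_of_ne_zero hb))]
      rw [Nat.gcd_comm b (a % b), ← Nat.gcd_rec b a, Nat.gcd_comm]

theorem solution_alt_eq (n m : Int) :
    solution_alt n m = [(Int.gcd n m : Int), PySem.Int.floordiv (n * m) (Int.gcd n m : Int)] := by
  simp [solution_alt, euclidLoop_eq_gcd, Int.gcd]

-- A's fold over 1..k returns G (the greatest common divisor) as soon as k has reached it
theorem fold_reaches (n m G : Int) (hG : 0 < G) (hdn : G ∣ n) (hdm : G ∣ m)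
    (hmax : ∀ i : Int, 0 < i → i ∣ n → i ∣ m → i ≤ G) (j : Nat) (a : Int) :
    (PySem.List.pyRange 1 (G + j + 1) 1).foldl
      (fun max_num i =>
        if (PySem.Int.mod n i == 0) && (PySem.Int.mod m i == 0) then i else max_num) a
    = G := by
  induction j with
  | zero =>
    have h1 : PySem.Int.mod n G = 0 := (PySem.Int.mod_eq_zero_iff_dvd n G).mpr hdn
    have h2 : PySem.Int.mod m G = 0 := (PySem.Int.mod_eq_zero_iff_dvd m G).mpr hdm
    rw [show G + (0:Nat) + 1 = G + 1 by push_cast; ring,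
        PySem.List.pyRange_one_succ_right (by omega : (1:Int) ≤ G), List.foldl_append]
    simp [h1, h2]
  | succ j ih =>
    rw [show G + (j+1:Nat) + 1 = (G + j + 1) + 1 by push_cast; ring,
        PySem.List.pyRange_one_succ_right (by omega : (1:Int) ≤ G + j + 1),
        List.foldl_append, ih]
    have hcond : ¬((PySem.Int.mod n (G + j + 1) == 0) && (PySem.Int.mod m (G + j + 1) == 0)) = true := by
      intro hc
      simp only [Bool.and_eq_true, beq_iff_eq] at hc
      have := hmax (G + j + 1) (by omega)
        ((PySem.Int.mod_eq_zero_iff_dvd n _).mp hc.1)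
        ((PySem.Int.mod_eq_zero_iff_dvd m _).mp hc.2)
      omega
    simp only [List.foldl_cons, List.foldl_nil]
    rw [if_neg hcond]

-- ===== VERDICT (by name: the statement is the Claim_ definition above) =====
theorem solution_spec : Claim_equal_solution := by
  intro n m _ hpre
  unfold Pre_solution at hpre
  unfold Spec_solution
  have hnm : 0 < n ∨ 0 < m := by
    rcases le_or_gt n m with h | h
    · right; have := max_eq_right h; omega
    · left; have := max_eq_left (le_of_lt h); omega
  have hG : 0 < (Int.gcd n m : Int) := by
    exact_mod_cast Nat.pos_of_ne_zero (fun h => by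
      rcases Int.gcd_eq_zero_iff.mp h with ⟨h1, h2⟩; omega)
  have hmax : ∀ i : Int, 0 < i → i ∣ n → i ∣ m → i ≤ (Int.gcd n m : Int) := fun i hi h1 h2 =>
    Int.le_of_dvd hG (Int.dvd_coe_gcd h1 h2)
  have hGle : (Int.gcd n m : Int) ≤ max n m := by
    rcases hnm with h | h
    · exact le_trans (Int.le_of_dvd h (Int.gcd_dvd_left n m)) (le_max_left n m)
    · exact le_trans (Int.le_of_dvd h (Int.gcd_dvd_right n m)) (le_max_right n m)
  rw [solution_alt_eq]
  unfold solution
  rw [show max n m + 1 = (Int.gcd n m : Int) + ((max n m - (Int.gcd n m : Int)).toNat : Int) + 1 by omega]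
  rw [fold_reaches n m (Int.gcd n m : Int) hG (Int.gcd_dvd_left n m) (Int.gcd_dvd_right n m) hmax _ 0]

@[simp] theorem solution_raises : Claim_raises_solution := by
  unfold Claim_raises_solution
  constructor
  · intro n m _ hr
    unfold Raises_solution at hr
    unfold Pre_solution
    simp only [not_le]
    rcases hr with ⟨h1, h2, _⟩
    exact max_lt (by omega) (by omega)
  · exact ⟨by decide, by decide, by rw [solution_alt_eq]; decide⟩
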